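-- pv_equiv track=rewrite | github.com/ChenNeuro/ChenNeuro | DSAL/代码/woodensticks.py | min_setup_time
-- ===== SOURCE A (Python) =====
-- def min_setup_time(sticks):
--     n = len(sticks)
--     check = [0] * n
--     setup_time = 0
--     while (0 in check):
--         i = 0
--         for j in range(n):
--             if check[j] == 0:
--                 i = j
--                 break
--         current = sticks[i]
--         check[i] = 1
--         setup_time += 1
--         i += 1
--         while i < n:
--
--             if check[i] == 0 and current[0] <= sticks[i][0] and current[1] <= sticks[i][1]:
--                 check[i] = 1
--                 current = sticks[i]
--             i += 1
--
--     return setup_time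
-- ===== SOURCE B (Python) =====
-- def min_setup_time(sticks):
--     # Single left-to-right pass, patience-style first-fit: keep the current
--     # top of each open chain; a stick extends the first chain whose top it
--     # dominates, otherwise it opens a new chain. Answer = number of chains.
--     tops = []
--     for s in sticks:
--         for i, t in enumerate(tops):
--             if t[0] <= s[0] and t[1] <= s[1]:
--                 tops[i] = s
--                 break
--         else:
--             tops.append(s)
--     return len(tops)
-- ===== Notes on version B (the rewrite author's own statement) =====
-- stated objective: alternative
-- what changed: Replaces A's repeated passes over a flags array (each pass extracting one greedy chain) by a single left-to-right pass that maintains the current tops of all open chains and assigns each stick first-fit to the first chain top it dominates, opening a new chain otherwise; the pile count equals A's pass count.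
import Mathlib
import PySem

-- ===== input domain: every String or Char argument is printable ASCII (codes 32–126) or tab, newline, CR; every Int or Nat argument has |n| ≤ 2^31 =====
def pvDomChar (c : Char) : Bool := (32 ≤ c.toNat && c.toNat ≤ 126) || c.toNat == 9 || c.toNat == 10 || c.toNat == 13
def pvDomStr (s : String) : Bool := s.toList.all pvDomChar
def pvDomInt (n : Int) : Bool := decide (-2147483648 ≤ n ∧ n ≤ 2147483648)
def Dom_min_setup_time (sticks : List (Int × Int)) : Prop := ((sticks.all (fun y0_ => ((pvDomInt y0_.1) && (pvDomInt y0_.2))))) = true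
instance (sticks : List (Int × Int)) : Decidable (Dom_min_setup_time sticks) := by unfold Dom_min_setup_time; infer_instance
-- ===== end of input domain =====

-- B replaces A's repeated chain-extracting passes over a flags array by ONE
-- left-to-right pass assigning each stick first-fit to the open chain tops.

-- ===== PORT A =====
-- inner `while i < n` loop of A, walking the suffix of check/sticks after the
-- pass's start index: flags that are 0 and dominate `current` are set to 1.
def pvInnerA (current : Int × Int) : List Int → List (Int × Int) → List Int
  | [], _ => []
  | c :: cs, [] => c :: cs          -- unreachable: check and sticks have equal length
  | c :: cs, s :: ss =>
    if c = 0 ∧ current.1 ≤ s.1 ∧ current.2 ≤ s.2 then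
      1 :: pvInnerA s cs ss
    else
      c :: pvInnerA current cs ss

-- one pass of A's outer loop body: the `for j in range(n)` search for the first
-- 0 flag (marked 1, its stick becoming `current`), then the inner loop above.
def pvPassA : List Int → List (Int × Int) → List Int
  | [], _ => []
  | c :: cs, [] => c :: cs          -- unreachable
  | c :: cs, s :: ss =>
    if c = 0 then 1 :: pvInnerA s cs ss else c :: pvPassA cs ss

-- A's `while (0 in check)` loop; fuel = n only makes it total (each real pass
-- clears at least one 0 flag, so n iterations always suffice — proved below).
def pvOuterA (fuel : Nat) (sticks : List (Int × Int)) (check : List Int) (setup_time : Int) : Int :=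
  match fuel with
  | 0 => setup_time
  | fuel + 1 =>
    if 0 ∈ check then pvOuterA fuel sticks (pvPassA check sticks) (setup_time + 1)
    else setup_time

def min_setup_time (sticks : List (Int × Int)) : Int :=
  pvOuterA sticks.length sticks (List.replicate sticks.length 0) 0

-- ===== PORT B =====
-- the inner `for i, t in enumerate(tops)` first-fit: replace the first top
-- dominated by s with s, or append s as a new chain top.
def pvFirstFit (s : Int × Int) : List (Int × Int) → List (Int × Int)
  | [] => [s]
  | t :: ts => if t.1 ≤ s.1 ∧ t.2 ≤ s.2 then s :: ts else t :: pvFirstFit s ts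

def min_setup_time_alt (sticks : List (Int × Int)) : Int :=
  ((sticks.foldl (fun ts s => pvFirstFit s ts) []).length : Int)

-- ===== PRECONDITION & SPEC =====
def Spec_min_setup_time (sticks : List (Int × Int)) (out : Int) : Prop := out = min_setup_time_alt sticks
instance (sticks : List (Int × Int)) (out : Int) : Decidable (Spec_min_setup_time sticks out) := by unfold Spec_min_setup_time; infer_instance

-- ===== CLAIM =====
def Claim_equal_min_setup_time : Prop := ∀ (sticks : List (Int × Int)), Dom_min_setup_time sticks → Spec_min_setup_time sticks (min_setup_time sticks)

-- ===== LEMMAS AND PROOFS =====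

-- one greedy pass over the not-yet-consumed sticks: consume every stick that
-- dominates `current` (chaining), keep the rest in order
def pvChainPass (current : Int × Int) : List (Int × Int) → List (Int × Int)
  | [] => []
  | s :: rest =>
    if current.1 ≤ s.1 ∧ current.2 ≤ s.2 then pvChainPass s rest
    else s :: pvChainPass current rest

theorem pvChainPass_length_le (current : Int × Int) (l : List (Int × Int)) :
    (pvChainPass current l).length ≤ l.length := by
  induction l generalizing current with
  | nil => simp [pvChainPass]
  | cons s rest ih =>
    simp only [pvChainPass]
    split
    · exact Nat.le_succ_of_le (ih s)
    · simpa using ih current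

-- A's pass count, expressed directly on the list of unconsumed sticks
def pvAltLoop : List (Int × Int) → Int
  | [] => 0
  | c :: rest => 1 + pvAltLoop (pvChainPass c rest)
termination_by l => l.length
decreasing_by
  exact Nat.lt_succ_of_le (pvChainPass_length_le c rest)

-- the sticks whose flag is still 0, in their original order
def pvZeros : List Int → List (Int × Int) → List (Int × Int)
  | c :: cs, s :: ss => if c = 0 then s :: pvZeros cs ss else pvZeros cs ss
  | _, _ => []

theorem pvInnerA_length (current : Int × Int) (cs : List Int) (ss : List (Int × Int)) :
    (pvInnerA current cs ss).length = cs.length := by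
  induction cs generalizing current ss with
  | nil => simp [pvInnerA]
  | cons c cs ih =>
    cases ss with
    | nil => simp [pvInnerA]
    | cons s ss =>
      simp only [pvInnerA]
      split <;> simp [ih]

theorem pvPassA_length (cs : List Int) (ss : List (Int × Int)) :
    (pvPassA cs ss).length = cs.length := by
  induction cs generalizing ss with
  | nil => simp [pvPassA]
  | cons c cs ih =>
    cases ss with
    | nil => simp [pvPassA]
    | cons s ss =>
      simp only [pvPassA]
      split <;> simp [pvInnerA_length, ih]

theorem pvZeros_length (cs : List Int) (ss : List (Int × Int))
    (h : cs.length = ss.length) : (pvZeros cs ss).length = cs.count 0 := by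
  induction cs generalizing ss with
  | nil => simp [pvZeros]
  | cons c cs ih =>
    cases ss with
    | nil => simp at h
    | cons s ss =>
      simp only [pvZeros, List.count_cons]
      by_cases hc : c = 0
      · simp [hc, ih ss (by simpa using h)]
      · simp [hc, ih ss (by simpa using h)]

theorem pvZeros_inner (current : Int × Int) (cs : List Int) (ss : List (Int × Int))
    (h : cs.length = ss.length) :
    pvZeros (pvInnerA current cs ss) ss = pvChainPass current (pvZeros cs ss) := by
  induction cs generalizing current ss with
  | nil => cases ss with
    | nil => simp [pvInnerA, pvZeros, pvChainPass]
    | cons s ss => simp at h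
  | cons c cs ih =>
    cases ss with
    | nil => simp at h
    | cons s ss =>
      by_cases hc : c = 0
      · subst hc
        by_cases hd : current.1 ≤ s.1 ∧ current.2 ≤ s.2
        · simp [pvInnerA, hd, pvZeros, pvChainPass, ih s ss (by simpa using h)]
        · simp [pvInnerA, hd, pvZeros, pvChainPass, ih current ss (by simpa using h)]
      · simp [pvInnerA, hc, pvZeros, ih current ss (by simpa using h)]

theorem pvZeros_pass (cs : List Int) (ss : List (Int × Int))
    (h : cs.length = ss.length) (hz : 0 ∈ cs) :
    ∃ z zs, pvZeros cs ss = z :: zs ∧ pvZeros (pvPassA cs ss) ss = pvChainPass z zs := by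
  induction cs generalizing ss with
  | nil => simp at hz
  | cons c cs ih =>
    cases ss with
    | nil => simp at h
    | cons s ss =>
      by_cases hc : c = 0
      · subst hc
        exact ⟨s, pvZeros cs ss, by simp [pvZeros],
          by simp [pvPassA, pvZeros, pvZeros_inner s cs ss (by simpa using h)]⟩
      · have hz' : 0 ∈ cs := by
          rcases List.mem_cons.1 hz with h' | h'
          · exact absurd h'.symm hc
          · exact h'
        obtain ⟨z, zs, h1, h2⟩ := ih ss (by simpa using h) hz'
        exact ⟨z, zs, by simp [pvZeros, hc, h1], by simp [pvPassA, pvZeros, hc, h2]⟩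

theorem pvZeros_nil_of_not_mem (cs : List Int) (ss : List (Int × Int))
    (h : cs.length = ss.length) (hz : 0 ∉ cs) : pvZeros cs ss = [] := by
  induction cs generalizing ss with
  | nil => simp [pvZeros]
  | cons c cs ih =>
    cases ss with
    | nil => simp at h
    | cons s ss =>
      have hc : ¬ c = 0 := fun hc => hz (by simp [hc])
      simp [pvZeros, hc, ih ss (by simpa using h) (fun h' => hz (List.mem_cons_of_mem _ h'))]

theorem pvOuterA_eq (fuel : Nat) (sticks : List (Int × Int)) (check : List Int) (setup : Int)
    (hlen : check.length = sticks.length) (hfuel : check.count 0 ≤ fuel) :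
    pvOuterA fuel sticks check setup = setup + pvAltLoop (pvZeros check sticks) := by
  induction fuel generalizing check setup with
  | zero =>
    have h0 : check.count 0 = 0 := Nat.le_zero.1 hfuel
    have hnm : 0 ∉ check := by
      intro hm
      have := List.count_pos_iff.2 hm; omega
    simp [pvOuterA, pvZeros_nil_of_not_mem check sticks hlen hnm, pvAltLoop]
  | succ fuel ih =>
    by_cases hz : 0 ∈ check
    · obtain ⟨z, zs, h1, h2⟩ := pvZeros_pass check sticks hlen hz
      have hlen' : (pvPassA check sticks).length = sticks.length := by
        rw [pvPassA_length]; exact hlen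
      have hcount : (pvPassA check sticks).count 0 ≤ fuel := by
        have e1 : (pvZeros (pvPassA check sticks) sticks).length = (pvPassA check sticks).count 0 :=
          pvZeros_length _ _ hlen'
        have e2 : (pvZeros check sticks).length = check.count 0 := pvZeros_length _ _ hlen
        have : (pvPassA check sticks).count 0 < check.count 0 := by
          rw [← e1, ← e2, h1, h2]
          exact Nat.lt_succ_of_le (by simpa using pvChainPass_length_le z zs)
        omega
      rw [pvOuterA, if_pos hz, ih (pvPassA check sticks) (setup + 1) hlen' hcount, h2, h1]
      simp only [pvAltLoop]
      ring
    · simp [pvOuterA, hz, pvZeros_nil_of_not_mem check sticks hlen hz, pvAltLoop]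

theorem pvZeros_replicate (ss : List (Int × Int)) :
    pvZeros (List.replicate ss.length 0) ss = ss := by
  induction ss with
  | nil => simp [pvZeros]
  | cons s ss ih => simp [List.replicate, pvZeros, ih]

-- ===== bridging A's pass decomposition to B's first-fit tops =====

-- the final `current` of one greedy pass
def pvChainTop (c : Int × Int) : List (Int × Int) → Int × Int
  | [] => c
  | s :: r => if c.1 ≤ s.1 ∧ c.2 ≤ s.2 then pvChainTop s r else pvChainTop c r

theorem pvChainTop_append (c s : Int × Int) (r : List (Int × Int)) :
    pvChainTop c (r ++ [s]) =
      if (pvChainTop c r).1 ≤ s.1 ∧ (pvChainTop c r).2 ≤ s.2 then s else pvChainTop c r := by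
  induction r generalizing c with
  | nil => simp [pvChainTop]
  | cons t r ih =>
    simp only [List.cons_append, pvChainTop]
    split <;> exact ih _

theorem pvChainPass_append (c s : Int × Int) (r : List (Int × Int)) :
    pvChainPass c (r ++ [s]) =
      if (pvChainTop c r).1 ≤ s.1 ∧ (pvChainTop c r).2 ≤ s.2 then pvChainPass c r
      else pvChainPass c r ++ [s] := by
  induction r generalizing c with
  | nil => simp [pvChainPass, pvChainTop]
  | cons t r ih =>
    simp only [List.cons_append, pvChainPass, pvChainTop]
    by_cases h : c.1 ≤ t.1 ∧ c.2 ≤ t.2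
    · simp only [if_pos h]; exact ih t
    · simp only [if_neg h, ih c]; split <;> simp

-- the tops of all chains of A's greedy pass decomposition, in pass order
def pvGreedTops : List (Int × Int) → List (Int × Int)
  | [] => []
  | c :: rest => pvChainTop c rest :: pvGreedTops (pvChainPass c rest)
termination_by l => l.length
decreasing_by
  exact Nat.lt_succ_of_le (pvChainPass_length_le c rest)

theorem pvAltLoop_eq_tops (l : List (Int × Int)) :
    pvAltLoop l = ((pvGreedTops l).length : Int) := by
  induction l using pvAltLoop.induct with
  | case1 => simp [pvAltLoop, pvGreedTops]
  | case2 c rest ih =>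
    rw [pvAltLoop, pvGreedTops, ih]
    simp
    ring

-- appending one stick first-fits it into the greedy chain tops
theorem pvGreedTops_append (s : Int × Int) (l : List (Int × Int)) :
    pvGreedTops (l ++ [s]) = pvFirstFit s (pvGreedTops l) := by
  induction l using pvGreedTops.induct with
  | case1 => simp [pvGreedTops, pvFirstFit, pvChainTop, pvChainPass]
  | case2 c rest ih =>
    rw [List.cons_append, pvGreedTops, pvChainTop_append, pvChainPass_append]
    by_cases h : (pvChainTop c rest).1 ≤ s.1 ∧ (pvChainTop c rest).2 ≤ s.2
    · simp only [if_pos h]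
      rw [pvGreedTops, pvFirstFit, if_pos h]
    · simp only [if_neg h]
      rw [ih, pvGreedTops, pvFirstFit, if_neg h]

theorem pvGreedTops_eq_foldl (l : List (Int × Int)) :
    pvGreedTops l = l.foldl (fun ts s => pvFirstFit s ts) [] := by
  induction l using List.reverseRecOn with
  | nil => simp [pvGreedTops]
  | append_singleton l s ih => rw [pvGreedTops_append, List.foldl_append, ih]; rfl

-- ===== VERDICT =====
theorem min_setup_time_spec : Claim_equal_min_setup_time := by
  intro sticks _
  unfold Spec_min_setup_time min_setup_time min_setup_time_alt
  rw [pvOuterA_eq sticks.length sticks (List.replicate sticks.length 0) 0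
      (by simp) (by simp), pvZeros_replicate, pvAltLoop_eq_tops, pvGreedTops_eq_foldl]
  ring
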